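-- pv_equiv track=rewrite | github.com/kongsa0419/ProblemSolversHub | week1/Baekjoon30189/dohyungLee/baekjoon_30189.py | f
-- ===== SOURCE A (Python) =====
-- def f(a,b,c) :
--     result = 0
--     if c == 0 :
--         return 1
--     else :
--         for j in range(a+1) :
--             for k in range(b+1) :
--                 if j + k == c :
--                     result += 1
--         return f(a,b,c-1) + result
-- ===== SOURCE B (Python) =====
-- def f(a, b, c):
--     # Same count, but the number of pairs (j,k) with 0<=j<=a, 0<=k<=b, j+k=i
--     # is the length of the interval [max(0,i-b), min(a,i)] — O(c) instead of O(c*a*b).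
--     total = 1  # A's base case for c == 0
--     for i in range(1, c + 1):
--         lo = 0 if i - b < 0 else i - b
--         hi = a if a < i else i
--         if lo <= hi:
--             total += hi - lo + 1
--     return total
-- ===== Notes on version B (the rewrite author's own statement) =====
-- stated objective: faster
-- what changed: Replaces the recursion over c with nested O(a*b) scans at each level by a single loop over i=1..c that counts the pairs summing to i in closed form as the length of the interval [max(0,i-b), min(a,i)].
import Mathlib
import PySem

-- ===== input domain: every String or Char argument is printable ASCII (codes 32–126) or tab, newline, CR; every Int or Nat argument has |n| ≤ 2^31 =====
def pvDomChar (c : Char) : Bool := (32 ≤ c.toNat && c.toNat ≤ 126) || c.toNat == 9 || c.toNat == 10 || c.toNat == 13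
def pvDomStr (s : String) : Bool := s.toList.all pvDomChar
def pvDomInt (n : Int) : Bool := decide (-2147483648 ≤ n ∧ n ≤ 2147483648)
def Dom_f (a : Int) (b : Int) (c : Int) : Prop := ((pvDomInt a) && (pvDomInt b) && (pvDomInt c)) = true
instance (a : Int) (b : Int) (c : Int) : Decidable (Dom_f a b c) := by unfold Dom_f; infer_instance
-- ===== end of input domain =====

-- B replaces A's O(c·a·b) recursion-with-nested-scans by one O(c) loop using a
-- closed-form count of the pairs summing to each i (asymptotically faster).


-- ===== PORT A =====
-- the two nested 'for' loops accumulating 'result' (started at 0)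
def fOuter (a : Int) (b : Int) (c : Int) : Int :=
  (PySem.List.pyRange 0 (a + 1) 1).foldl
    (fun r j =>
      (PySem.List.pyRange 0 (b + 1) 1).foldl
        (fun r k => if j + k = c then r + 1 else r) r)
    0

-- A's recursion on c, as structural recursion on c.toNat (A diverges for c < 0;
-- those inputs are excluded by Pre_f)
def fA (a : Int) (b : Int) : Nat → Int
  | 0 => 1
  | n + 1 => fA a b n + fOuter a b ((n : Int) + 1)

def f (a : Int) (b : Int) (c : Int) : Int :=
  if c = 0 then 1 else fA a b c.toNat

-- ===== PORT B =====
def f_alt (a : Int) (b : Int) (c : Int) : Int :=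
  (PySem.List.pyRange 1 (c + 1) 1).foldl
    (fun t i =>
      let lo := if i - b < 0 then 0 else i - b
      let hi := if a < i then a else i
      if lo ≤ hi then t + (hi - lo + 1) else t)
    1

-- ===== PRECONDITION & SPEC =====
-- A recurses on c-1 with base case c == 0 only: for c < 0 it never terminates
-- (Python RecursionError), so Pre_f admits exactly c ≥ 0.
def Pre_f (a : Int) (b : Int) (c : Int) : Prop := 0 ≤ c
instance (a : Int) (b : Int) (c : Int) : Decidable (Pre_f a b c) := by unfold Pre_f; infer_instance
def pvWitness_f : Int × Int × Int := (3, 2, 4)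

def Spec_f (a : Int) (b : Int) (c : Int) (out : Int) : Prop := out = f_alt a b c
instance (a : Int) (b : Int) (c : Int) (out : Int) : Decidable (Spec_f a b c out) := by unfold Spec_f; infer_instance

-- ===== CLAIM (what is proved, stated in full; the proofs are below) =====
def Claim_equal_f : Prop := ∀ (a : Int) (b : Int) (c : Int), Dom_f a b c → Pre_f a b c → Spec_f a b c (f a b c)

-- ===== LEMMAS AND PROOFS =====

-- integers of [a,b) lying in [lo,hi]: closed-form count
lemma countP_pyRange_interval (lo hi : Int) : ∀ (a b : Int),
    ((PySem.List.pyRange a b 1).countP (fun x => decide (lo ≤ x ∧ x ≤ hi)) : Int)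
      = max 0 (min b (hi + 1) - max a lo) := by
  intro a b
  by_cases hab : b ≤ a
  · rw [PySem.List.pyRange_one_eq_nil hab]; simp; omega
  · have : ∀ (n : Nat) (a : Int), b - a = n →
        ((PySem.List.pyRange a b 1).countP (fun x => decide (lo ≤ x ∧ x ≤ hi)) : Int)
          = max 0 (min b (hi + 1) - max a lo) := by
      intro n
      induction n with
      | zero => intro a ha; rw [PySem.List.pyRange_one_eq_nil (by omega)]; simp; omega
      | succ m ih =>
          intro a ha
          rw [PySem.List.pyRange_one_cons (by omega), List.countP_cons]
          push_cast
          rw [ih (a + 1) (by omega)]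
          by_cases hp : lo ≤ a ∧ a ≤ hi
          · rw [if_pos (by simpa using hp)]; omega
          · rw [if_neg (by simpa using hp)]; omega
    exact this (b - a).toNat a (by omega)

-- the inner 'for k' loop counts the single k = c - j when it lies in [0, b]
lemma inner_loop (b c j r : Int) :
    (PySem.List.pyRange 0 (b + 1) 1).foldl
        (fun r k => if j + k = c then r + 1 else r) r
      = r + (if (fun j => decide (c - b ≤ j ∧ j ≤ c)) j = true then 1 else 0) := by
  have h1 : (fun r k => if j + k = c then r + 1 else r)
      = fun (r k : Int) => if (fun k => decide (j + k = c)) k = true then r + 1 else r := by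
    funext r k; simp
  rw [h1, PySem.List.foldl_count_if]
  have h2 : (fun k => decide (j + k = c)) = fun k => decide (c - j ≤ k ∧ k ≤ c - j) := by
    funext k; simp only [decide_eq_decide]; omega
  rw [h2, countP_pyRange_interval]
  simp only [decide_eq_true_eq]
  have h3 : (c - b ≤ j ∧ j ≤ c) ↔ (0 ≤ c - j ∧ c - j ≤ b) := by omega
  split_ifs with h4 <;> omega

-- A's whole double loop, in closed form
lemma fOuter_closed (a b c : Int) :
    fOuter a b c = max 0 (min (a + 1) (c + 1) - max 0 (c - b)) := by
  unfold fOuter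
  have h1 : (fun (r j : Int) =>
      (PySem.List.pyRange 0 (b + 1) 1).foldl (fun r k => if j + k = c then r + 1 else r) r)
      = fun r j => r + (fun j => if (fun j => decide (c - b ≤ j ∧ j ≤ c)) j = true then (1:Int) else 0) j := by
    funext r j; rw [inner_loop]
  rw [h1, PySem.List.foldl_add, PySem.List.sum_map_ite_one_zero, countP_pyRange_interval]
  omega

-- B's loop body adds exactly the same closed form
lemma f_alt_step (a b c : Int) (hc : 0 ≤ c) :
    f_alt a b (c + 1) = f_alt a b c + max 0 (min (a + 1) (c + 1 + 1) - max 0 (c + 1 - b)) := by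
  unfold f_alt
  rw [PySem.List.pyRange_one_succ_right (show (1:Int) ≤ c + 1 by omega), List.foldl_append]
  simp only [List.foldl_cons, List.foldl_nil]
  split_ifs <;> omega

lemma main_nat (a b : Int) : ∀ (n : Nat), fA a b n = f_alt a b (n : Int) := by
  intro n
  induction n with
  | zero =>
      show (1 : Int) = f_alt a b ((0 : Nat) : Int)
      unfold f_alt
      rw [Nat.cast_zero, show (0:Int) + 1 = 1 by ring, PySem.List.pyRange_one_eq_nil le_rfl]
      rfl
  | succ m ih =>
      calc fA a b (m + 1) = fA a b m + fOuter a b ((m : Int) + 1) := rfl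
        _ = f_alt a b (m : Int)
              + max 0 (min (a + 1) ((m : Int) + 1 + 1) - max 0 ((m : Int) + 1 - b)) := by
              rw [ih, fOuter_closed]
        _ = f_alt a b ((m : Int) + 1) := (f_alt_step a b (m : Int) (by positivity)).symm
        _ = f_alt a b ((m + 1 : Nat) : Int) := by norm_cast

-- ===== VERDICT (by name: the statement is the Claim_ definition above) =====
theorem f_spec : Claim_equal_f := by
  intro a b c _ hpre
  unfold Spec_f f
  by_cases hc : c = 0
  · subst hc
    simpa using main_nat a b 0
  · rw [if_neg hc]
    have := main_nat a b c.toNat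
    rwa [Int.toNat_of_nonneg hpre] at this
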